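-- pv_equiv track=rewrite | github.com/Japhy98/DSA456 | ASSIGNMENT01/assignment1.py | bubble_sort
-- ===== SOURCE A (Python) =====
-- def bubble_sort(my_list):
--     steps = 0
--     n = len(my_list)
--     for i in range(n - 1):
--         for j in range(n - 1 - i):
--             steps += 1  # comparison
--             if my_list[j] > my_list[j + 1]:
--                 my_list[j], my_list[j + 1] = my_list[j + 1], my_list[j]
--                 steps += 3  # swap assignments
--     return steps
-- ===== SOURCE B (Python) =====
-- def bubble_sort(my_list):
--     # steps = comparisons + 3*swaps = n*(n-1)//2 + 3*inversions;
--     # inversions counted by merge sort (A sorts my_list in place; B does not mutate it)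
--     n = len(my_list)
--
--     def sort_count(a):
--         if len(a) < 2:
--             return a, 0
--         mid = len(a) // 2
--         left, lc = sort_count(a[:mid])
--         right, rc = sort_count(a[mid:])
--         merged = []
--         inv = 0
--         i = 0
--         j = 0
--         while i < len(left) and j < len(right):
--             if left[i] <= right[j]:
--                 merged.append(left[i])
--                 i += 1
--             else:
--                 merged.append(right[j])
--                 j += 1
--                 inv += len(left) - i
--         merged = merged + left[i:] + right[j:]
--         return merged, lc + rc + inv
--
--     _, inv = sort_count(my_list)
--     return n * (n - 1) // 2 + 3 * inv
-- ===== Notes on version B (the rewrite author's own statement) =====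
-- stated objective: faster
-- what changed: Replaces the O(n^2) in-place bubble passes by a closed form for the comparison count plus a merge-sort inversion counter: steps = n*(n-1)//2 + 3*inversions (A sorts my_list in place; B does not mutate it).
import Mathlib
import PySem

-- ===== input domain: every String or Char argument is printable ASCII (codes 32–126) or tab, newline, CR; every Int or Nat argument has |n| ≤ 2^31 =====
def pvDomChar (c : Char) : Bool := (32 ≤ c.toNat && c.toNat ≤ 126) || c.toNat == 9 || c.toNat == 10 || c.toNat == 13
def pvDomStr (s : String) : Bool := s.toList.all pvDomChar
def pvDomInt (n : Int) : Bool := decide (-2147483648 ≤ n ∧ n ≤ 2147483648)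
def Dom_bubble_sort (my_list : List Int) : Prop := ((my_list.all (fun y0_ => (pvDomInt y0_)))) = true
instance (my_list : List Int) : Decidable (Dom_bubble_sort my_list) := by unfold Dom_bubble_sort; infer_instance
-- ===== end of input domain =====

-- B replaces A's O(n^2) in-place bubble passes by a closed comparison count n*(n-1)//2 plus a
-- merge-sort inversion counter (steps agree; A sorts my_list in place, B does not mutate it;
-- only the RETURN value is claimed equal).

-- ===== PORT A =====
-- the body of the inner 'for j in range(n - 1 - i)' loop of A
def bubbleInner (st : List Int × Int) (j : Int) : List Int × Int :=
  let l := st.1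
  let steps := st.2 + 1                                   -- steps += 1  (comparison)
  if PySem.List.pyGetD l j 0 > PySem.List.pyGetD l (j + 1) 0 then
    -- my_list[j], my_list[j+1] = my_list[j+1], my_list[j]  (indices provably in range)
    (PySem.List.pySetD (PySem.List.pySetD l j (PySem.List.pyGetD l (j + 1) 0)) (j + 1)
       (PySem.List.pyGetD l j 0),
     steps + 3)                                           -- steps += 3  (swap assignments)
  else (l, steps)

-- one iteration of the outer 'for i in range(n - 1)' loop of A
def bubbleOuter (n : Int) (st : List Int × Int) (i : Int) : List Int × Int :=
  (PySem.List.pyRange 0 (n - 1 - i) 1).foldl bubbleInner st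

def bubble_sort (my_list : List Int) : Int :=
  let n : Int := (my_list.length : Int)
  ((PySem.List.pyRange 0 (n - 1) 1).foldl (bubbleOuter n) (my_list, 0)).2

-- ===== PORT B =====
-- the 'while i < len(left) and j < len(right)' merge loop of Source B
def mergeLoop (left right : List Int) (i j : Int) (merged : List Int) (inv : Int) :
    List Int × Int :=
  if _h : i < (left.length : Int) ∧ j < (right.length : Int) then
    if PySem.List.pyGetD left i 0 ≤ PySem.List.pyGetD right j 0 then
      mergeLoop left right (i + 1) j (merged ++ [PySem.List.pyGetD left i 0]) inv
    else
      mergeLoop left right i (j + 1) (merged ++ [PySem.List.pyGetD right j 0])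
        (inv + ((left.length : Int) - i))
  else
    -- merged = merged + left[i:] + right[j:]
    (merged ++ PySem.List.slice left (some i) none ++ PySem.List.slice right (some j) none, inv)
termination_by (((left.length : Int) - i) + ((right.length : Int) - j)).toNat
decreasing_by all_goals omega

-- sort_count of Source B: returns (sorted copy, inversion count)
def sortCount (a : List Int) : List Int × Int :=
  if a.length < 2 then (a, 0)
  else
    let mid := PySem.Int.floordiv (a.length : Int) 2
    let L := sortCount (PySem.List.slice a none (some mid))      -- a[:mid]
    let R := sortCount (PySem.List.slice a (some mid) none)      -- a[mid:]
    let M := mergeLoop L.1 R.1 0 0 [] 0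
    (M.1, L.2 + R.2 + M.2)
termination_by a.length
decreasing_by
  · rw [show PySem.Int.floordiv ((a.length : Nat) : Int) 2 = ((a.length / 2 : Nat) : Int) from by exact_mod_cast PySem.Int.floordiv_natCast a.length 2,
        PySem.List.slice_to_natCast]
    simp; omega
  · rw [show PySem.Int.floordiv ((a.length : Nat) : Int) 2 = ((a.length / 2 : Nat) : Int) from by exact_mod_cast PySem.Int.floordiv_natCast a.length 2,
        PySem.List.slice_from_natCast]
    simp; omega

def bubble_sort_alt (my_list : List Int) : Int :=
  let n : Int := (my_list.length : Int)
  PySem.Int.floordiv (n * (n - 1)) 2 + 3 * (sortCount my_list).2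

-- ===== PRECONDITION & SPEC =====
def Spec_bubble_sort (my_list : List Int) (out : Int) : Prop := out = bubble_sort_alt my_list
instance (my_list : List Int) (out : Int) : Decidable (Spec_bubble_sort my_list out) := by unfold Spec_bubble_sort; infer_instance

-- ===== CLAIM (what is proved, stated in full; the proofs are below) =====
def Claim_equal_bubble_sort : Prop := ∀ (my_list : List Int), Dom_bubble_sort my_list → Spec_bubble_sort my_list (bubble_sort my_list)

-- ===== LEMMAS AND PROOFS =====

def invN : List Int → Nat
  | [] => 0
  | x :: t => t.countP (fun y => decide (y < x)) + invN t
def cross (A B : List Int) : Nat := (A.map (fun x => B.countP (fun y => decide (y < x)))).sum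

lemma cross_cons_right (A : List Int) (y : Int) (R : List Int) :
    cross A (y :: R) = A.countP (fun x => decide (y < x)) + cross A R := by
  induction A with
  | nil => simp [cross]
  | cons a A ih =>
    have h1 : cross (a :: A) (y :: R) = (y :: R).countP (fun z => decide (z < a)) + cross A (y :: R) := by
      simp [cross]
    have h2 : cross (a :: A) R = R.countP (fun z => decide (z < a)) + cross A R := by
      simp [cross]
    rw [h1, ih, h2, List.countP_cons, List.countP_cons]
    by_cases h : y < a <;> by_cases h2 : y < a <;> simp [h] <;> omega

lemma cross_perm_left {A A' : List Int} (h : A.Perm A') (B : List Int) : cross A B = cross A' B := by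
  exact List.Perm.sum_eq (h.map _)

lemma cross_perm_right (A : List Int) {B B' : List Int} (h : B.Perm B') : cross A B = cross A B' := by
  unfold cross
  congr 1
  exact List.map_congr_left fun x _ => h.countP_eq _

lemma invN_append (A B : List Int) : invN (A ++ B) = invN A + invN B + cross A B := by
  induction A with
  | nil => simp [invN, cross]
  | cons a A ih => simp [invN, cross, List.countP_append, ih]; omega

lemma invN_short {l : List Int} (h : l.length ≤ 1) : invN l = 0 := by
  match l, h with
  | [], _ => rfl
  | [x], _ => simp [invN]

lemma invN_append_max {q : List Int} {M : Int} (h : ∀ a ∈ q, a ≤ M) : invN (q ++ [M]) = invN q := by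
  induction q with
  | nil => simp [invN]
  | cons a q ih =>
    have ha : ¬ (M < a) := not_lt.mpr (h a (by simp))
    simp [invN, List.countP_append, ha, ih (fun b hb => h b (by simp [hb]))]
def natStep (st : List Int × Int) (j : Nat) : List Int × Int :=
  if st.1.getD (j + 1) 0 < st.1.getD j 0 then
    ((st.1.set j (st.1.getD (j + 1) 0)).set (j + 1) (st.1.getD j 0), st.2 + 1 + 3)
  else (st.1, st.2 + 1)
def natOuter (n : Nat) (st : List Int × Int) (i : Nat) : List Int × Int :=
  (List.range (n - 1 - i)).foldl natStep st

def pass1 : List Int → List Int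
  | [] => []
  | [x] => [x]
  | x :: y :: t => if y < x then y :: pass1 (x :: t) else x :: pass1 (y :: t)
termination_by l => l.length
def swaps1 : List Int → Nat
  | [] => 0
  | [_] => 0
  | x :: y :: t => if y < x then swaps1 (x :: t) + 1 else swaps1 (y :: t)
termination_by l => l.length

lemma step_fun_eq : (fun (st : List Int × Int) (k : Nat) => bubbleInner st ((0 : Int) + (k : Int))) = natStep := by
  funext st k
  show bubbleInner st ((0 : Int) + (k : Int)) = natStep st k
  rw [show (0 : Int) + (k : Int) = (k : Int) by ring]
  unfold bubbleInner natStep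
  rw [show (k : Int) + 1 = ((k + 1 : Nat) : Int) by omega]
  simp only [PySem.List.pyGetD_natCast, PySem.List.pySetD_natCast, gt_iff_lt]

lemma inner_int_nat (m : Nat) (st : List Int × Int) :
    (PySem.List.pyRange 0 (m : Int) 1).foldl bubbleInner st = (List.range m).foldl natStep st := by
  rw [PySem.List.pyRange_one, show ((m : Int) - 0).toNat = m by omega, List.foldl_map, step_fun_eq]

lemma portA_nat (l : List Int) :
    bubble_sort l = ((List.range (l.length - 1)).foldl (natOuter l.length) (l, 0)).2 := by
  show ((PySem.List.pyRange 0 ((l.length : Int) - 1) 1).foldl (bubbleOuter (l.length : Int)) (l, 0)).2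
      = ((List.range (l.length - 1)).foldl (natOuter l.length) (l, 0)).2
  rw [PySem.List.pyRange_one, show ((l.length : Int) - 1 - 0).toNat = l.length - 1 by omega,
      List.foldl_map]
  congr 1
  apply PySem.List.foldl_congr_mem
  intro st k hk
  have hk' : k < l.length - 1 := List.mem_range.mp hk
  show bubbleOuter (l.length : Int) st ((0 : Int) + (k : Int)) = natOuter l.length st k
  unfold bubbleOuter natOuter
  rw [show ((l.length : Int) - 1 - ((0 : Int) + (k : Int))) = ((l.length - 1 - k : Nat) : Int) by omega,
      inner_int_nat]
lemma pass1_length (l : List Int) : (pass1 l).length = l.length := by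
  fun_induction pass1 with
  | case1 => rfl
  | case2 => rfl
  | case3 x y t h ih => simp at *; omega
  | case4 x y t h ih => simp at *; omega

lemma pass1_perm (l : List Int) : (pass1 l).Perm l := by
  fun_induction pass1 with
  | case1 => rfl
  | case2 => exact List.Perm.refl _
  | case3 x y t h ih =>
    exact ((ih.cons y).trans (List.Perm.swap x y t))
  | case4 x y t h ih =>
    exact ih.cons x

lemma invN_pass1 (l : List Int) : invN l = swaps1 l + invN (pass1 l) := by
  fun_induction pass1 with
  | case1 => simp [invN, swaps1]
  | case2 => simp [invN, swaps1]
  | case3 x y t h ih =>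
    have hc : (pass1 (x :: t)).countP (fun z => decide (z < y)) = (x :: t).countP (fun z => decide (z < y)) :=
      (pass1_perm (x :: t)).countP_eq _
    rw [show swaps1 (x :: y :: t) = swaps1 (x :: t) + 1 from by rw [swaps1]; simp [h]]
    simp only [invN, List.countP_cons, hc] at *
    have hx : ¬ x < y := not_lt.mpr h.le
    simp only [decide_eq_true_eq] at *
    simp [h, hx] at *
    omega
  | case4 x y t h ih =>
    have hc : (pass1 (y :: t)).countP (fun z => decide (z < x)) = (y :: t).countP (fun z => decide (z < x)) :=
      (pass1_perm (y :: t)).countP_eq _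
    rw [show swaps1 (x :: y :: t) = swaps1 (y :: t) from by rw [swaps1]; simp [h]]
    simp only [invN, List.countP_cons, hc] at *
    simp [h] at *
    omega

lemma pass1_decomp (l : List Int) (h : l ≠ []) :
    ∃ q M, pass1 l = q ++ [M] ∧ ∀ a ∈ l, a ≤ M := by
  fun_induction pass1 with
  | case1 => exact absurd rfl h
  | case2 x => exact ⟨[], x, rfl, by simp⟩
  | case3 x y t hlt ih =>
    obtain ⟨q, M, hq, hM⟩ := ih (by simp)
    refine ⟨y :: q, M, by simp [hq], ?_⟩
    intro a ha
    rcases List.mem_cons.mp ha with rfl | ha'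
    · exact hM a (by simp)
    · rcases List.mem_cons.mp ha' with rfl | ha''
      · exact le_trans (le_of_lt hlt) (hM x (by simp))
      · exact hM a (by simp [ha''])
  | case4 x y t hlt ih =>
    obtain ⟨q, M, hq, hM⟩ := ih (by simp)
    refine ⟨x :: q, M, by simp [hq], ?_⟩
    intro a ha
    rcases List.mem_cons.mp ha with rfl | ha'
    · exact le_trans (not_lt.mp hlt) (hM y (by simp))
    · exact hM a ha'

lemma natStep_cons (h : Int) (t : List Int) (s : Int) (j : Nat) :
    natStep (h :: t, s) (j + 1) = (h :: (natStep (t, s) j).1, (natStep (t, s) j).2) := by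
  simp only [natStep, List.getD_cons_succ, List.set_cons_succ]
  split <;> rfl

lemma foldl_natStep_cons (js : List Nat) : ∀ (t : List Int) (s : Int) (h : Int),
    js.foldl (fun st j => natStep st (j + 1)) (h :: t, s)
      = (h :: (js.foldl natStep (t, s)).1, (js.foldl natStep (t, s)).2) := by
  induction js with
  | nil => intro t s h; rfl
  | cons j js ih =>
    intro t s h
    simp only [List.foldl_cons, natStep_cons]
    rw [ih]

lemma innerNat (M : Nat) : ∀ (l : List Int) (s : Int), M + 1 ≤ l.length →
    (List.range M).foldl natStep (l, s)
      = (pass1 (l.take (M + 1)) ++ l.drop (M + 1),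
         s + (M : Int) + 3 * (swaps1 (l.take (M + 1)) : Int)) := by
  induction M with
  | zero =>
    intro l s hl
    match l, hl with
    | x :: t, _ => simp [pass1, swaps1]
  | succ M ih =>
    intro l s hl
    match l, hl with
    | x :: y :: t, hl =>
      rw [List.range_succ_eq_map, List.foldl_cons, List.foldl_map]
      have h0 : natStep (x :: y :: t, s) 0 =
          if y < x then (y :: x :: t, s + 1 + 3) else (x :: y :: t, s + 1) := by
        simp only [natStep]
        split <;> simp_all [List.getD]
      have hstep : (fun (st : List Int × Int) (j : Nat) => natStep st j.succ)
          = fun st j => natStep st (j + 1) := rfl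
      rw [h0]
      by_cases hxy : y < x
      · simp only [hxy, if_pos, hstep]
        rw [foldl_natStep_cons, ih (x :: t) (s + 1 + 3) (by simpa using hl)]
        simp only [List.take, List.drop, pass1, swaps1, hxy, if_pos]
        simp only [List.cons_append, Prod.mk.injEq]
        exact ⟨trivial, by push_cast; ring⟩
      · simp only [hxy, ite_false, hstep]
        rw [foldl_natStep_cons, ih (y :: t) (s + 1) (by simpa using hl)]
        simp only [List.take, List.drop, pass1, swaps1, hxy, ite_false]
        simp only [List.cons_append, Prod.mk.injEq]
        exact ⟨trivial, by push_cast; ring⟩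

def Cnat (n k : Nat) : Nat := ∑ i ∈ Finset.range k, (n - 1 - i)

lemma outerNat (l0 : List Int) : ∀ (k : Nat), k + 1 ≤ l0.length →
    ∃ L : List Int, L.length = l0.length ∧
      (List.range k).foldl (natOuter l0.length) (l0, 0)
        = (L, (Cnat l0.length k : Int) + 3 * (invN l0 : Int)
               - 3 * (invN (L.take (l0.length - k)) : Int)) := by
  intro k
  induction k with
  | zero =>
    intro hk
    refine ⟨l0, rfl, ?_⟩
    simp only [List.range_zero, List.foldl_nil, Nat.sub_zero, List.take_length, Cnat]
    simp
  | succ k ih =>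
    intro hk
    obtain ⟨L, hL, hfold⟩ := ih (by omega)
    have hM : (l0.length - 1 - k) + 1 ≤ L.length := by omega
    rw [List.range_succ, List.foldl_append, hfold]
    simp only [List.foldl_cons, List.foldl_nil, natOuter]
    rw [innerNat (l0.length - 1 - k) L _ hM]
    have htake : l0.length - 1 - k + 1 = l0.length - k := by omega
    rw [htake]
    have hPlen : (L.take (l0.length - k)).length = l0.length - k := by
      simp; omega
    have hPne : L.take (l0.length - k) ≠ [] := by
      intro hnil; rw [hnil] at hPlen; simp at hPlen; omega
    obtain ⟨q, M, hq, hMmax⟩ := pass1_decomp (L.take (l0.length - k)) hPne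
    have hql : (pass1 (L.take (l0.length - k))).length = l0.length - k := by
      rw [pass1_length]; omega
    refine ⟨pass1 (L.take (l0.length - k)) ++ L.drop (l0.length - k), by simp [hql]; omega, ?_⟩
    have hnewtake : (pass1 (L.take (l0.length - k)) ++ L.drop (l0.length - k)).take (l0.length - (k + 1))
        = (pass1 (L.take (l0.length - k))).dropLast := by
      rw [List.take_append_of_le_length (by omega), List.dropLast_eq_take, hql,
          show l0.length - (k + 1) = l0.length - k - 1 from by omega]
    rw [hnewtake]
    have hdrop : (pass1 (L.take (l0.length - k))).dropLast = q := by rw [hq]; simp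
    have hinvq : invN (pass1 (L.take (l0.length - k))) = invN q := by
      rw [hq]
      refine invN_append_max (fun a ha => hMmax a ?_)
      exact (pass1_perm _).mem_iff.mp (by rw [hq]; simp [ha])
    have h2 : invN ((pass1 (L.take (l0.length - k))).dropLast)
        = invN (pass1 (L.take (l0.length - k))) := by rw [hdrop]; exact hinvq.symm
    have hswap : (invN (L.take (l0.length - k)) : Int)
        = (swaps1 (L.take (l0.length - k)) : Int) + (invN (pass1 (L.take (l0.length - k))) : Int) := by
      exact_mod_cast congrArg (Nat.cast (R := Int)) (invN_pass1 (L.take (l0.length - k)))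
    have hC : Cnat l0.length (k + 1) = Cnat l0.length k + (l0.length - 1 - k) := by
      simp [Cnat, Finset.sum_range_succ]
    simp only [Prod.mk.injEq]
    refine ⟨trivial, ?_⟩
    omega

lemma Cnat_gauss (n : Nat) : 2 * Cnat n (n - 1) = n * (n - 1) := by
  have key : ∀ m : Nat, 2 * (∑ i ∈ Finset.range m, (m - i)) = m * (m + 1) := by
    intro m
    induction m with
    | zero => simp
    | succ m ihm =>
      have hs : ∑ i ∈ Finset.range (m + 1), (m + 1 - i)
          = (∑ i ∈ Finset.range m, (m - i)) + (m + 1) := by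
        rw [Finset.sum_range_succ]
        have hcg : ∀ i ∈ Finset.range m, m + 1 - i = (m - i) + 1 := by
          intro i hi; have := Finset.mem_range.mp hi; omega
        rw [Finset.sum_congr rfl hcg, Finset.sum_add_distrib]
        simp
        omega
      rw [hs, Nat.mul_add, ihm]
      ring
  cases n with
  | zero => simp [Cnat]
  | succ m =>
    have hk := key m
    have : Cnat (m + 1) ((m + 1) - 1) = ∑ i ∈ Finset.range m, (m - i) := by
      simp [Cnat]
    rw [this]
    simpa [Nat.mul_comm] using hk

lemma A_eq (l : List Int) (h : l ≠ []) :
    bubble_sort l = (Cnat l.length (l.length - 1) : Int) + 3 * (invN l : Int) := by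
  have hlen : 1 ≤ l.length := List.length_pos_iff.mpr h
  obtain ⟨L, hL, hfold⟩ := outerNat l (l.length - 1) (by omega)
  rw [portA_nat, hfold]
  have h1 : l.length - (l.length - 1) = 1 := by omega
  rw [h1]
  have h0 : invN (L.take 1) = 0 := invN_short (by simp)
  rw [h0]
  push_cast
  ring

-- ---------- B side: the merge loop as a structural merge ----------

def mergeS : List Int → List Int → List Int × Nat
  | [], R => (R, 0)
  | L, [] => (L, 0)
  | x :: L, y :: R =>
    if x ≤ y then
      let p := mergeS L (y :: R); (x :: p.1, p.2)
    else
      let p := mergeS (x :: L) R; (y :: p.1, p.2 + (x :: L).length)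
termination_by L R => L.length + R.length

lemma mergeLoop_eq : ∀ (fuel : Nat) (L R : List Int) (i j : Nat) (merged : List Int) (inv : Int),
    (L.length - i) + (R.length - j) ≤ fuel →
    mergeLoop L R (i : Int) (j : Int) merged inv
      = (merged ++ (mergeS (L.drop i) (R.drop j)).1,
         inv + ((mergeS (L.drop i) (R.drop j)).2 : Int)) := by
  intro fuel
  induction fuel with
  | zero =>
    intro L R i j merged inv hf
    have hi : L.length ≤ i := by omega
    have hj : R.length ≤ j := by omega
    rw [mergeLoop]
    rw [dif_neg (by omega)]
    rw [List.drop_of_length_le hi, List.drop_of_length_le hj]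
    simp [mergeS, PySem.List.slice_from_natCast, List.drop_of_length_le, hi, hj]
  | succ fuel ih =>
    intro L R i j merged inv hf
    rw [mergeLoop]
    by_cases hc : i < L.length ∧ j < R.length
    · rw [dif_pos (by omega)]
      have hdi : L.drop i = L[i] :: L.drop (i + 1) := List.drop_eq_getElem_cons hc.1
      have hdj : R.drop j = R[j] :: R.drop (j + 1) := List.drop_eq_getElem_cons hc.2
      have hgi : PySem.List.pyGetD L (i : Int) 0 = L[i] := by
        simp [PySem.List.pyGetD_natCast, List.getD_eq_getElem?_getD, hc.1]
      have hgj : PySem.List.pyGetD R (j : Int) 0 = R[j] := by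
        simp [PySem.List.pyGetD_natCast, List.getD_eq_getElem?_getD, hc.2]
      rw [hgi, hgj]
      by_cases hle : L[i] ≤ R[j]
      · rw [if_pos hle]
        rw [show (i : Int) + 1 = ((i + 1 : Nat) : Int) from by omega]
        rw [ih L R (i + 1) j _ _ (by omega)]
        rw [hdi, hdj]
        rw [show mergeS (L[i] :: L.drop (i + 1)) (R[j] :: R.drop (j + 1))
              = (L[i] :: (mergeS (L.drop (i + 1)) (R[j] :: R.drop (j + 1))).1,
                 (mergeS (L.drop (i + 1)) (R[j] :: R.drop (j + 1))).2) from by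
          rw [mergeS]; simp [hle]]
        rw [← hdj]
        simp [List.append_assoc]
      · rw [if_neg hle]
        rw [show (j : Int) + 1 = ((j + 1 : Nat) : Int) from by omega]
        rw [ih L R i (j + 1) _ _ (by omega)]
        rw [hdi, hdj]
        rw [show mergeS (L[i] :: L.drop (i + 1)) (R[j] :: R.drop (j + 1))
              = (R[j] :: (mergeS (L[i] :: L.drop (i + 1)) (R.drop (j + 1))).1,
                 (mergeS (L[i] :: L.drop (i + 1)) (R.drop (j + 1))).2 + (L[i] :: L.drop (i + 1)).length) from by
          rw [mergeS]; simp [hle]]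
        rw [← hdi]
        simp only [Prod.mk.injEq]
        constructor
        · simp [List.append_assoc]
        · push_cast [List.length_drop]
          omega
    · rw [dif_neg (by omega)]
      rcases not_and_or.mp hc with hi | hj
      · have hi' : L.length ≤ i := by omega
        rw [List.drop_of_length_le hi']
        simp [mergeS, PySem.List.slice_from_natCast, List.drop_of_length_le, hi']
      · have hj' : R.length ≤ j := by omega
        rw [List.drop_of_length_le hj']
        cases hdl : L.drop i with
        | nil => simp [mergeS, PySem.List.slice_from_natCast, hdl, hj']
        | cons a A => simp [mergeS, PySem.List.slice_from_natCast, hdl, hj']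

lemma mergeS_spec : ∀ (L R : List Int), L.Pairwise (· ≤ ·) → R.Pairwise (· ≤ ·) →
    (mergeS L R).1.Pairwise (· ≤ ·) ∧ (mergeS L R).1.Perm (L ++ R) ∧ (mergeS L R).2 = cross L R := by
  intro L R
  fun_induction mergeS with
  | case1 R =>
    intro _ hR
    simpa [cross] using hR
  | case2 L hne =>
    intro hL _
    simpa [cross] using hL
  | case3 x L y R hle p ih =>
    intro hL hR
    show (x :: (mergeS L (y :: R)).1).Pairwise (· ≤ ·) ∧
         (x :: (mergeS L (y :: R)).1).Perm ((x :: L) ++ (y :: R)) ∧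
         (mergeS L (y :: R)).2 = cross (x :: L) (y :: R)
    obtain ⟨hx, hL'⟩ := List.pairwise_cons.mp hL
    obtain ⟨hy, hR'⟩ := List.pairwise_cons.mp hR
    obtain ⟨ihs, ihp, ihc⟩ := ih hL' hR
    refine ⟨?_, ?_, ?_⟩
    · refine List.pairwise_cons.mpr ⟨?_, ihs⟩
      intro b hb
      have hb' : b ∈ L ++ y :: R := ihp.mem_iff.mp hb
      rcases List.mem_append.mp hb' with h | h
      · exact hx b h
      · rcases List.mem_cons.mp h with rfl | h
        · exact hle
        · exact le_trans hle (hy b h)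
    · exact ihp.cons x
    · rw [ihc]
      have h0 : (y :: R).countP (fun z => decide (z < x)) = 0 := by
        rw [List.countP_eq_zero]
        intro z hz
        rcases List.mem_cons.mp hz with rfl | h
        · simpa using not_lt.mpr hle
        · simpa using not_lt.mpr (le_trans hle (hy z h))
      have : cross (x :: L) (y :: R) = (y :: R).countP (fun z => decide (z < x)) + cross L (y :: R) := by
        simp [cross]
      rw [this, h0]
      simp
  | case4 x L y R hle p ih =>
    intro hL hR
    show (y :: (mergeS (x :: L) R).1).Pairwise (· ≤ ·) ∧
         (y :: (mergeS (x :: L) R).1).Perm ((x :: L) ++ (y :: R)) ∧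
         (mergeS (x :: L) R).2 + (x :: L).length = cross (x :: L) (y :: R)
    have hyx : y < x := not_le.mp hle
    obtain ⟨hx, hL'⟩ := List.pairwise_cons.mp hL
    obtain ⟨hy, hR'⟩ := List.pairwise_cons.mp hR
    obtain ⟨ihs, ihp, ihc⟩ := ih hL hR'
    refine ⟨?_, ?_, ?_⟩
    · refine List.pairwise_cons.mpr ⟨?_, ihs⟩
      intro b hb
      have hb' : b ∈ (x :: L) ++ R := ihp.mem_iff.mp hb
      rcases List.mem_append.mp hb' with h | h
      · rcases List.mem_cons.mp h with rfl | h
        · exact hyx.le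
        · exact le_trans hyx.le (hx b h)
      · exact hy b h
    · exact (ihp.cons y).trans List.perm_middle.symm
    · rw [ihc]
      have hfull : (x :: L).countP (fun z => decide (y < z)) = (x :: L).length := by
        rw [List.countP_eq_length]
        intro z hz
        rcases List.mem_cons.mp hz with rfl | h
        · simpa using hyx
        · simpa using lt_of_lt_of_le hyx (hx z h)
      rw [cross_cons_right, hfull]
      omega

lemma sortCount_spec : ∀ (a : List Int),
    (sortCount a).1.Pairwise (· ≤ ·) ∧ (sortCount a).1.Perm a ∧ (sortCount a).2 = (invN a : Int) := by
  intro a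
  fun_induction sortCount with
  | case1 a hlt =>
    refine ⟨?_, List.Perm.refl a, by rw [invN_short (l := a) (by omega)]; simp⟩
    match a, hlt with
    | [], _ => simp
    | [x], _ => simp
  | case2 a hlt mid L R M ihL ihR =>
    have hmid : mid = ((a.length / 2 : Nat) : Int) := by
      exact_mod_cast PySem.Int.floordiv_natCast a.length 2
    have hsl : PySem.List.slice a none (some mid) = a.take (a.length / 2) := by
      rw [hmid, PySem.List.slice_to_natCast]
    have hsr : PySem.List.slice a (some mid) none = a.drop (a.length / 2) := by
      rw [hmid, PySem.List.slice_from_natCast]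
    have hLdef : L = sortCount (a.take (a.length / 2)) := by
      show sortCount (PySem.List.slice a none (some mid)) = _
      rw [hsl]
    have hRdef : R = sortCount (a.drop (a.length / 2)) := by
      show sortCount (PySem.List.slice a (some mid) none) = _
      rw [hsr]
    rw [hsl] at ihL
    rw [hsr] at ihR
    obtain ⟨sL, pL, cL⟩ := ihL
    obtain ⟨sR, pR, cR⟩ := ihR
    have h00 := mergeLoop_eq (L.1.length + R.1.length) L.1 R.1 0 0 [] 0 (by omega)
    simp only [Nat.cast_zero, List.drop_zero, List.nil_append, zero_add] at h00
    have hMdef : M = ((mergeS L.1 R.1).1, ((mergeS L.1 R.1).2 : Int)) := by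
      show mergeLoop L.1 R.1 0 0 [] 0 = _
      rw [h00]
    rw [hLdef, hRdef] at hMdef
    obtain ⟨ms, mp, mc⟩ := mergeS_spec _ _ sL sR
    have hperm : (mergeS (sortCount (a.take (a.length / 2))).1 (sortCount (a.drop (a.length / 2))).1).1.Perm a := by
      refine mp.trans ?_
      refine ((pL.append pR).trans ?_)
      rw [List.take_append_drop]
    refine ⟨?_, ?_, ?_⟩
    · show M.1.Pairwise (· ≤ ·)
      rw [hMdef]
      exact ms
    · show M.1.Perm a
      rw [hMdef]
      exact hperm
    · show L.2 + R.2 + M.2 = (invN a : Int)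
      rw [hMdef, hLdef, hRdef, cL, cR]
      have hcr : cross (sortCount (a.take (a.length / 2))).1 (sortCount (a.drop (a.length / 2))).1
          = cross (a.take (a.length / 2)) (a.drop (a.length / 2)) := by
        rw [cross_perm_left pL, cross_perm_right _ pR]
      have hia := invN_append (a.take (a.length / 2)) (a.drop (a.length / 2))
      rw [List.take_append_drop] at hia
      rw [mc, hcr]
      push_cast
      omega

lemma B_eq (l : List Int) :
    bubble_sort_alt l
      = PySem.Int.floordiv ((l.length : Int) * ((l.length : Int) - 1)) 2 + 3 * (invN l : Int) := by
  show PySem.Int.floordiv ((l.length : Int) * ((l.length : Int) - 1)) 2 + 3 * (sortCount l).2 = _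
  rw [(sortCount_spec l).2.2]

-- ===== VERDICT (by name: the statement is the Claim_ definition above) =====
theorem bubble_sort_spec : Claim_equal_bubble_sort := by
  unfold Claim_equal_bubble_sort Spec_bubble_sort
  intro l _
  by_cases h : l = []
  · subst h
    rw [B_eq []]
    decide
  · rw [A_eq l h, B_eq l]
    have hlen : 1 ≤ l.length := List.length_pos_iff.mpr h
    have hg := Cnat_gauss l.length
    have hcast : ((l.length : Int) * ((l.length : Int) - 1))
        = 2 * (Cnat l.length (l.length - 1) : Int) := by
      have : ((l.length * (l.length - 1) : Nat) : Int)
          = ((2 * Cnat l.length (l.length - 1) : Nat) : Int) := by rw [← hg]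
      push_cast [Nat.cast_sub hlen] at this
      linarith
    rw [hcast, PySem.Int.floordiv_eq_ediv_of_pos (by norm_num),
        Int.mul_ediv_cancel_left _ (by norm_num)]
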